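-- pv_equiv track=rewrite | github.com/seongs/Python-Test | 프로그래머스/unrated/181932. 코드 처리하기/코드 처리하기.py | solution
-- ===== SOURCE A (Python) =====
-- def solution(code):
--     mode = 0
--     answer = ''
--     for i in range(len(code)):
--         if (mode == 0):
--             if(i % 2 == 0 and code[i] != '1'):
--                 answer += code[i]
--             elif code[i] == '1':
--                 mode = 1
--         elif (mode == 1):
--             if(i % 2 == 1 and code[i] != '1'):
--                 answer += code[i]
--             elif code[i] == '1':
--                 mode = 0
--     if answer == '':
--          answer = 'EMPTY'
--
--
--
--     return answer
-- ===== SOURCE B (Python) =====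
-- def solution(code):
--     kept = []
--     pos = 0
--     for k, seg in enumerate(code.split('1')):
--         for j, ch in enumerate(seg):
--             if (pos + j) % 2 == k % 2:
--                 kept.append(ch)
--         pos += len(seg) + 1
--     return ''.join(kept) or 'EMPTY'
-- ===== Notes on version B (the rewrite author's own statement) =====
-- stated objective: simpler
-- what changed: B splits the code on '1' and filters each segment by comparing absolute-index parity with the segment index's parity, eliminating A's mode state variable and the per-character '1' branching.
import Mathlib
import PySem

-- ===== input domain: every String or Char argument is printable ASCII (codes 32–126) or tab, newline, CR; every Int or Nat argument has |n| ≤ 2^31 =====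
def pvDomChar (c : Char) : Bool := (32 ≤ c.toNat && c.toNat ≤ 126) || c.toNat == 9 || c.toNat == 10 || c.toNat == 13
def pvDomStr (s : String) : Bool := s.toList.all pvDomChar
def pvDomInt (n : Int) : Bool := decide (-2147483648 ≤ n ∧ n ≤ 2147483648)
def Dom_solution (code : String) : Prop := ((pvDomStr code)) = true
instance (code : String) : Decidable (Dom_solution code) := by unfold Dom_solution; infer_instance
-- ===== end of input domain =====

-- B rebuilds the answer by splitting the code on '1' and filtering each segment by
-- absolute-index parity against the segment index's parity (objective: simpler decomposition,
-- no mode variable and no per-character '1' branch). Return value only; neither version mutates.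

-- ===== PORT A =====
-- one iteration of A's loop: state (mode, answer), input (i, code[i])
def solnStepA (st : Int × List Char) (ic : Int × Char) : Int × List Char :=
  let mode := st.1
  let answer := st.2
  let i := ic.1
  let c := ic.2
  if mode == 0 then
    if PySem.Int.mod i 2 == 0 && c != '1' then (mode, answer ++ [c])
    else if c == '1' then (1, answer)
    else (mode, answer)
  else if mode == 1 then
    if PySem.Int.mod i 2 == 1 && c != '1' then (mode, answer ++ [c])
    else if c == '1' then (0, answer)
    else (mode, answer)
  else (mode, answer)

def solution (code : String) : String :=
  let st := (PySem.List.enumerate code.toList 0).foldl solnStepA (0, [])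
  if st.2 == [] then "EMPTY" else String.ofList st.2

-- ===== PORT B =====
-- inner loop of B: keep seg[j] iff (pos+j) % 2 == k % 2
def solnSegB (pos k : Int) (kept seg : List Char) : List Char :=
  (PySem.List.enumerate seg 0).foldl
    (fun kept jc =>
      if PySem.Int.mod (pos + jc.1) 2 == PySem.Int.mod k 2 then kept ++ [jc.2] else kept) kept

-- outer step of B: state (pos, kept), input (k, seg)
def solnStepB (st : Int × List Char) (ks : Int × List Char) : Int × List Char :=
  (st.1 + ks.2.length + 1, solnSegB st.1 ks.1 st.2 ks.2)

def solution_alt (code : String) : String :=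
  let parts := PySem.Chars.splitOn code.toList ['1']
  let st := (PySem.List.enumerate parts 0).foldl solnStepB (0, [])
  if st.2 == [] then "EMPTY" else String.ofList st.2

-- ===== PRECONDITION & SPEC =====
def Spec_solution (code : String) (out : String) : Prop := out = solution_alt code
instance (code : String) (out : String) : Decidable (Spec_solution code out) := by unfold Spec_solution; infer_instance

-- ===== CLAIM (what is proved, stated in full; the proofs are below) =====
def Claim_equal_solution : Prop := ∀ (code : String), Dom_solution code → Spec_solution code (solution code)

-- ===== LEMMAS AND PROOFS =====

-- split on the single character '1', as a plain structural recursion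
def splitOne : List Char → List (List Char)
  | [] => [[]]
  | c :: rest =>
    if c == '1' then [] :: splitOne rest
    else
      match splitOne rest with
      | s :: ss => (c :: s) :: ss
      | [] => [[c]]

lemma splitOne_ne_nil (l : List Char) : splitOne l ≠ [] := by
  cases l with
  | nil => simp [splitOne]
  | cons c rest =>
    simp only [splitOne]
    split <;> try simp
    split <;> simp

-- prepend to the head segment (what splitOn.go's `cur` accumulator holds)
def consHead (pre : List Char) : List (List Char) → List (List Char)
  | [] => []
  | s :: ss => (pre ++ s) :: ss

lemma splitOn_go_eq (fuel : Nat) (l cur : List Char) (acc : List (List Char))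
    (h : l.length < fuel) :
    PySem.Chars.splitOn.go ['1'] fuel l cur acc
      = acc.reverse ++ consHead cur.reverse (splitOne l) := by
  induction fuel generalizing l cur acc with
  | zero => omega
  | succ fuel ih =>
    cases l with
    | nil =>
      rw [PySem.Chars.splitOn.go.eq_def]
      simp [splitOne, consHead]
    | cons c rest =>
      rw [PySem.Chars.splitOn.go.eq_def]
      by_cases hc : c = '1'
      · subst hc
        have hpre : List.isPrefixOf ['1'] ('1' :: rest) = true := by
          simp [List.isPrefixOf]
        simp only [hpre, if_pos, List.length_cons, List.length_nil, List.drop_succ_cons,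
          List.drop_zero]
        rw [ih rest [] (cur.reverse :: acc) (by simp at h ⊢; omega)]
        simp [splitOne, consHead]
        cases hs : splitOne rest with
        | nil => exact absurd hs (splitOne_ne_nil rest)
        | cons s ss => simp
      · have hpre : List.isPrefixOf ['1'] (c :: rest) = false := by
          simp [List.isPrefixOf]; exact fun h' => hc h'.symm
        simp only [hpre, Bool.false_eq_true, if_false]
        rw [ih rest (c :: cur) acc (by simp at h ⊢; omega)]
        have hone : (c == '1') = false := by simp [hc]
        simp only [splitOne, hone, Bool.false_eq_true, if_false]
        cases hs : splitOne rest with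
        | nil => exact absurd hs (splitOne_ne_nil rest)
        | cons s ss => simp [consHead]

lemma splitOn_eq_splitOne (cs : List Char) :
    PySem.Chars.splitOn cs ['1'] = splitOne cs := by
  rw [PySem.Chars.splitOn, splitOn_go_eq cs.length.succ cs [] [] (by omega)]
  cases h : splitOne cs with
  | nil => exact absurd h (splitOne_ne_nil cs)
  | cons s ss => simp [consHead]

-- glue back: intercalate ['1']
def glueTail : List (List Char) → List Char
  | [] => []
  | s :: rest => '1' :: (s ++ glueTail rest)

def glue : List (List Char) → List Char
  | [] => []
  | s :: rest => s ++ glueTail rest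

lemma glueTail_eq (l : List (List Char)) (h : l ≠ []) : glueTail l = '1' :: glue l := by
  cases l with
  | nil => exact absurd rfl h
  | cons s rest => simp [glueTail, glue]

lemma glue_splitOne (cs : List Char) : glue (splitOne cs) = cs := by
  induction cs with
  | nil => simp [splitOne, glue, glueTail]
  | cons c rest ih =>
    obtain ⟨s, ss, hs⟩ : ∃ s ss, splitOne rest = s :: ss := by
      cases h : splitOne rest with
      | nil => exact absurd h (splitOne_ne_nil rest)
      | cons s ss => exact ⟨s, ss, rfl⟩
    rw [hs] at ih
    by_cases hc : c = '1'
    · subst hc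
      rw [splitOne, if_pos (by simp), hs, glue, glueTail_eq _ (by simp), ih]
      simp
    · rw [splitOne, if_neg (by simp [hc]), hs]
      rw [glue] at ih ⊢
      simp only [List.cons_append, ih]

lemma splitOne_one_free (cs : List Char) : ∀ seg ∈ splitOne cs, '1' ∉ seg := by
  induction cs with
  | nil => simp [splitOne]
  | cons c rest ih =>
    by_cases hc : c = '1'
    · subst hc
      rw [splitOne, if_pos (by simp)]
      intro seg hseg
      rcases List.mem_cons.mp hseg with h | h
      · subst h; simp
      · exact ih seg h
    · rw [splitOne, if_neg (by simp [hc])]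
      obtain ⟨s, ss, hs⟩ : ∃ s ss, splitOne rest = s :: ss := by
        cases h : splitOne rest with
        | nil => exact absurd h (splitOne_ne_nil rest)
        | cons s ss => exact ⟨s, ss, rfl⟩
      rw [hs]
      intro seg hseg
      rcases List.mem_cons.mp hseg with h' | h'
      · subst h'
        intro hmem
        rcases List.mem_cons.mp hmem with h'' | h''
        · exact hc h''.symm
        · exact ih s (hs ▸ List.mem_cons_self ..) h''
      · exact ih seg (hs ▸ List.mem_cons_of_mem s h')

-- the common per-segment filter: keep chars at positions of parity m
def keepSeg (m : Int) : List Char → Int → List Char → List Char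
  | [], _, acc => acc
  | c :: cs, p, acc => keepSeg m cs (p + 1) (if PySem.Int.mod p 2 == m then acc ++ [c] else acc)

lemma mod_two_cases (k : Int) : PySem.Int.mod k 2 = 0 ∨ PySem.Int.mod k 2 = 1 := by
  rw [PySem.Int.mod_eq_emod_of_pos (by norm_num)]
  omega

lemma mod_two_flip (k : Int) : PySem.Int.mod (k + 1) 2 = 1 - PySem.Int.mod k 2 := by
  rw [PySem.Int.mod_eq_emod_of_pos (by norm_num),
      PySem.Int.mod_eq_emod_of_pos (by norm_num)]
  omega

lemma segA (seg : List Char) (hfree : '1' ∉ seg) (m : Int) (hm : m = 0 ∨ m = 1)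
    (p : Int) (acc : List Char) :
    (PySem.List.enumerate seg p).foldl solnStepA (m, acc) = (m, keepSeg m seg p acc) := by
  induction seg generalizing p acc with
  | nil => simp [keepSeg]
  | cons c cs ih =>
    have hc : c ≠ '1' := fun h => hfree (h ▸ List.mem_cons_self ..)
    have hfree' : '1' ∉ cs := fun h => hfree (List.mem_cons_of_mem c h)
    rw [PySem.List.enumerate_cons, List.foldl_cons]
    have hstep : solnStepA (m, acc) (p, c)
        = (m, if PySem.Int.mod p 2 == m then acc ++ [c] else acc) := by
      rcases hm with hm | hm <;> subst hm <;>
        simp [solnStepA, hc] <;> split <;> simp_all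
    rw [hstep, ih hfree' _ _]
    simp [keepSeg]

lemma segB (seg : List Char) (pos k : Int) (j : Int) (kept : List Char) :
    (PySem.List.enumerate seg j).foldl
      (fun kept jc =>
        if PySem.Int.mod (pos + jc.1) 2 == PySem.Int.mod k 2 then kept ++ [jc.2] else kept) kept
    = keepSeg (PySem.Int.mod k 2) seg (pos + j) kept := by
  induction seg generalizing j kept with
  | nil => simp [keepSeg]
  | cons c cs ih =>
    rw [PySem.List.enumerate_cons, List.foldl_cons, ih]
    simp [keepSeg]
    ring_nf

lemma solnSegB_eq (pos k : Int) (kept seg : List Char) :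
    solnSegB pos k kept seg = keepSeg (PySem.Int.mod k 2) seg pos kept := by
  rw [solnSegB, segB]
  norm_num

lemma enum_append {α : Type} (xs ys : List α) (s : Int) :
    PySem.List.enumerate (xs ++ ys) s
      = PySem.List.enumerate xs s ++ PySem.List.enumerate ys (s + xs.length) := by
  induction xs generalizing s with
  | nil => simp
  | cons x xs ih =>
    simp [PySem.List.enumerate_cons, ih]
    ring_nf

lemma stepA_one (m : Int) (hm : m = 0 ∨ m = 1) (i : Int) (ans : List Char) :
    solnStepA (m, ans) (i, '1') = (1 - m, ans) := by
  rcases hm with hm | hm <;> subst hm <;> simp [solnStepA]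

lemma outerLoop (segs : List (List Char)) (hfree : ∀ seg ∈ segs, '1' ∉ seg)
    (k pos : Int) (acc : List Char) :
    ((PySem.List.enumerate (glue segs) pos).foldl solnStepA (PySem.Int.mod k 2, acc)).2
      = ((PySem.List.enumerate segs k).foldl solnStepB (pos, acc)).2 := by
  induction segs generalizing k pos acc with
  | nil => simp [glue]
  | cons s rest ih =>
    have hfs : '1' ∉ s := hfree s (List.mem_cons_self ..)
    have hfr : ∀ seg ∈ rest, '1' ∉ seg := fun seg h => hfree seg (List.mem_cons_of_mem s h)
    rw [PySem.List.enumerate_cons, List.foldl_cons]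
    have hB : solnStepB (pos, acc) (k, s)
        = (pos + s.length + 1, keepSeg (PySem.Int.mod k 2) s pos acc) := by
      rw [solnStepB, solnSegB_eq]
    cases rest with
    | nil =>
      simp only [glue, glueTail, List.append_nil]
      rw [segA s hfs _ (mod_two_cases k) pos acc]
      simp [hB]
    | cons t ts =>
      have hglue : glue (s :: t :: ts) = s ++ '1' :: glue (t :: ts) := by
        rw [show glue (s :: t :: ts) = s ++ glueTail (t :: ts) from rfl,
            glueTail_eq _ (by simp)]
      rw [hglue, enum_append, List.foldl_append,
          segA s hfs _ (mod_two_cases k) pos acc,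
          PySem.List.enumerate_cons, List.foldl_cons,
          stepA_one _ (mod_two_cases k)]
      have h1m : (1 : Int) - PySem.Int.mod k 2 = PySem.Int.mod (k + 1) 2 :=
        (mod_two_flip k).symm
      rw [h1m, ih hfr (k + 1) (pos + s.length + 1)]
      rw [hB]

-- ===== VERDICT (by name: the statement is the Claim_ definition above) =====
theorem solution_spec : Claim_equal_solution := by
  intro code _
  show Spec_solution code (solution code)
  have h := outerLoop (splitOne code.toList) (splitOne_one_free code.toList) 0 0 []
  rw [glue_splitOne] at h
  simp only [show PySem.Int.mod 0 2 = (0 : Int) from by decide] at h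
  simp only [Spec_solution, solution, solution_alt, splitOn_eq_splitOne, h]
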